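-- pv_equiv track=rewrite | github.com/codeparameter/Azad_uni_compiler | dfa_tree.py | decompose_plus
-- ===== SOURCE A (Python) =====
-- def decompose_plus(regex):
--     new_reg = ''
--     cache = ''
--     parenthesis_openings = []
--
--     for i, char in enumerate(regex):
--
--         if char == '(':
--             parenthesis_openings.append(i)
--
--         elif char == ')':
--             assert parenthesis_openings, 'There is no opening for ")"'
--
--             if len(parenthesis_openings) == 1:
--                 _from = parenthesis_openings[0]
--                 _to = i
--
--                 assert _from - _to < 1, "Parenthesis must include characters"
--                 cache = '(' + decompose_plus(regex[_from + 1:_to]) + ')'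
--                 new_reg += cache
--
--             parenthesis_openings.pop()
--
--         elif not parenthesis_openings:
--             if char == '+':
--                 new_reg += '.' + cache + '*'
--             else:
--                 cache = char
--                 new_reg += cache
--
--     assert not parenthesis_openings, "some parenthesis didn't close"
--
--     return new_reg
-- ===== SOURCE B (Python) =====
-- def decompose_plus(regex):
--     # Single pass with an explicit stack of (accumulator, cache) frames,
--     # instead of recursion + slicing on each top-level parenthesized group.
--     stack = [("", "")]
--     for ch in regex:
--         if ch == '(':
--             stack.append(("", ""))
--         elif ch == ')':
--             assert len(stack) > 1, 'There is no opening for ")"'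
--             inner, _ = stack.pop()
--             group = '(' + inner + ')'
--             acc, _ = stack[-1]
--             stack[-1] = (acc + group, group)
--         elif ch == '+':
--             acc, cache = stack[-1]
--             stack[-1] = (acc + '.' + cache + '*', cache)
--         else:
--             acc, _ = stack[-1]
--             stack[-1] = (acc + ch, ch)
--     assert len(stack) == 1, "some parenthesis didn't close"
--     return stack[0][0]
-- ===== Notes on version B (the rewrite author's own statement) =====
-- stated objective: alternative
-- what changed: A recurses on each top-level parenthesized group, slicing the string and re-scanning it per nesting level; B instead makes a single pass over the characters with an explicit stack of (accumulator, cache) frames and no recursion or slicing.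
import Mathlib
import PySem

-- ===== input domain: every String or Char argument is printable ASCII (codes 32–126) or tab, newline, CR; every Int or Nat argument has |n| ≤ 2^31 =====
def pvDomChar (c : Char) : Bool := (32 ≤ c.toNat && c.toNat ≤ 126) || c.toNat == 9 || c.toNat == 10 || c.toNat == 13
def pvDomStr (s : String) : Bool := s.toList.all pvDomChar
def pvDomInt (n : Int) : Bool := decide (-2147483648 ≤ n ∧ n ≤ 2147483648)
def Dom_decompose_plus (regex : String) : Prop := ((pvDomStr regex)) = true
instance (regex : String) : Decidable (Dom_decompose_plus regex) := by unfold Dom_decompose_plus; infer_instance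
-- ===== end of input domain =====

-- B replaces A's recursion + per-group slicing by a single non-recursive pass with an explicit
-- stack of (accumulator, cache) frames; equivalence of return values is proved on balanced inputs
-- (on unbalanced input both Pythons raise AssertionError — excluded by Pre_).

-- ===== PORT A =====
-- A is recursive on string slices; `fuel` (length + 1 at the top call) only makes the
-- recursion structural — it never runs out on inputs where the Python returns.
mutual
def dpA : Nat → List Char → List Char
  | 0, _ => []
  | fuel+1, regex =>
    (dpALoop fuel regex (PySem.List.enumerate regex 0) ([], [], [])).1
    -- Python's final `assert not parenthesis_openings` raises on unbalanced input (outside Pre_)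
  termination_by fuel _ => (fuel, 0)

def dpALoop : Nat → List Char → List (Int × Char) → List Char × List Char × List Int →
    List Char × List Char × List Int
  | _, _, [], st => st
  | fuel, regex, (i, c) :: rest, (newReg, cache, stk) =>
    if c = '(' then
      dpALoop fuel regex rest (newReg, cache, stk ++ [i])
    else if c = ')' then
      match stk with
      | [] => dpALoop fuel regex rest (newReg, cache, [])  -- Python: assert fails here (outside Pre_)
      | [f] =>
        if f - i < 1 then  -- Python's (vacuously true) `assert _from - _to < 1`
          let cache' := '(' :: dpA fuel (PySem.List.slice regex (some (f + 1)) (some i)) ++ [')']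
          dpALoop fuel regex rest (newReg ++ cache', cache', [])
        else dpALoop fuel regex rest (newReg, cache, [])
      | stk' => dpALoop fuel regex rest (newReg, cache, stk'.dropLast)  -- .pop()
    else if stk = [] then
      if c = '+' then dpALoop fuel regex rest (newReg ++ '.' :: cache ++ ['*'], cache, stk)
      else dpALoop fuel regex rest (newReg ++ [c], [c], stk)
    else dpALoop fuel regex rest (newReg, cache, stk)
  termination_by fuel _ pairs _ => (fuel, pairs.length + 1)
end

def decompose_plus (regex : String) : String :=
  String.mk (dpA (regex.toList.length + 1) regex.toList)

-- ===== PORT B =====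
def bStep (st : List (List Char × List Char)) (c : Char) : List (List Char × List Char) :=
  if c = '(' then ([], []) :: st
  else if c = ')' then
    match st with
    | (inner, _) :: (acc, _) :: fr =>
      let group := '(' :: inner ++ [')']
      (acc ++ group, group) :: fr
    | st' => st'  -- Python: assert len(stack) > 1 fails here (outside Pre_)
  else
    match st with
    | (acc, cache) :: fr =>
      if c = '+' then (acc ++ '.' :: cache ++ ['*'], cache) :: fr
      else (acc ++ [c], [c]) :: fr
    | [] => []

def decompose_plus_alt (regex : String) : String :=
  match regex.toList.foldl bStep [([], [])] with
  | (acc, _) :: _ => String.mk acc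
  | [] => ""  -- unreachable (the stack is never emptied); Python asserts len(stack) == 1

-- ===== PRECONDITION & SPEC =====
-- Pre_ excludes exactly the unbalanced-parentheses inputs, on which Python A (and B) raise AssertionError.
def Pre_decompose_plus (regex : String) : Prop :=
  (∀ p ∈ List.range (regex.toList.length + 1),
      (regex.toList.take p).count ')' ≤ (regex.toList.take p).count '(') ∧
    regex.toList.count '(' = regex.toList.count ')'
instance (regex : String) : Decidable (Pre_decompose_plus regex) := by
  unfold Pre_decompose_plus; infer_instance

def pvWitness_decompose_plus : String := "a+(b+)c+"

def Spec_decompose_plus (regex : String) (out : String) : Prop := out = decompose_plus_alt regex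
instance (regex : String) (out : String) : Decidable (Spec_decompose_plus regex out) := by
  unfold Spec_decompose_plus; infer_instance

-- ===== CLAIM (what is proved, stated in full; the proofs are below) =====
def Claim_equal_decompose_plus : Prop := ∀ (regex : String), Dom_decompose_plus regex →
  Pre_decompose_plus regex → Spec_decompose_plus regex (decompose_plus regex)

-- ===== LEMMAS AND PROOFS =====

-- `bal cs`: every prefix has at least as many '(' as ')', and the totals agree.
def preOK (cs : List Char) : Prop := ∀ p : Nat, (cs.take p).count ')' ≤ (cs.take p).count '('
def bal (cs : List Char) : Prop := preOK cs ∧ cs.count '(' = cs.count ')'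

lemma pre_imp_bal (regex : String) (h : Pre_decompose_plus regex) : bal regex.toList := by
  obtain ⟨h1, h2⟩ := h
  refine ⟨fun p => ?_, h2⟩
  by_cases hp : p ≤ regex.toList.length
  · exact h1 p (List.mem_range.mpr (by omega))
  · rw [List.take_of_length_le (by omega)]
    have := h1 regex.toList.length (List.mem_range.mpr (by omega))
    rwa [List.take_length] at this

lemma bal_cons_other {c : Char} {t : List Char} (hc1 : c ≠ '(') (hc2 : c ≠ ')')
    (h : bal (c :: t)) : bal t := by
  obtain ⟨h1, h2⟩ := h
  constructor
  · intro p
    have := h1 (p + 1)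
    simpa [List.take_succ_cons, List.count_cons, hc1, hc2] using this
  · simpa [List.count_cons, hc1, hc2] using h2

lemma bal_not_rparen {t : List Char} (h : bal (')' :: t)) : False := by
  have := h.1 1
  simp [List.count_cons] at this

-- first-crossing split: if ')' exceed '(' by more than d, split at the (d+1)-st unmatched ')'
lemma firstCross : ∀ (t : List Char) (d : Nat), d + t.count '(' < t.count ')' →
    ∃ inner rest, t = inner ++ ')' :: rest ∧ inner.count ')' = inner.count '(' + d ∧
      ∀ p : Nat, (inner.take p).count ')' ≤ (inner.take p).count '(' + d := by
  intro t
  induction t with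
  | nil => intro d h; simp at h
  | cons c t ih =>
    intro d h
    by_cases hcr : c = ')'
    · subst hcr
      cases d with
      | zero =>
        exact ⟨[], t, rfl, by simp, fun p => by simp⟩
      | succ d' =>
        have h' : d' + t.count '(' < t.count ')' := by
          simp [List.count_cons] at h; omega
        obtain ⟨inner, rest, he, hc, hp⟩ := ih d' h'
        refine ⟨')' :: inner, rest, by simp [he], by simp [List.count_cons, hc]; omega, ?_⟩
        intro p
        cases p with
        | zero => simp
        | succ p' =>
          have := hp p'
          simp [List.take_succ_cons, List.count_cons]
          omega
    · by_cases hco : c = '('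
      · subst hco
        have h' : (d + 1) + t.count '(' < t.count ')' := by
          simp [List.count_cons] at h; omega
        obtain ⟨inner, rest, he, hc, hp⟩ := ih (d + 1) h'
        refine ⟨'(' :: inner, rest, by simp [he], by simp [List.count_cons]; omega, ?_⟩
        intro p
        cases p with
        | zero => simp
        | succ p' =>
          have := hp p'
          simp [List.take_succ_cons, List.count_cons]
          omega
      · have h' : d + t.count '(' < t.count ')' := by
          simp [List.count_cons, hcr, hco] at h ⊢; omega
        obtain ⟨inner, rest, he, hc, hp⟩ := ih d h'
        refine ⟨c :: inner, rest, by simp [he], by simp [List.count_cons, hcr, hco]; omega, ?_⟩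
        intro p
        cases p with
        | zero => simp
        | succ p' =>
          have := hp p'
          simp [List.take_succ_cons, List.count_cons, hcr, hco]
          omega

-- a balanced string starting with '(' splits as '(' inner ')' rest, both parts balanced
lemma balSplit {t : List Char} (h : bal ('(' :: t)) :
    ∃ inner rest, t = inner ++ ')' :: rest ∧ bal inner ∧ bal rest := by
  obtain ⟨h1, h2⟩ := h
  have hcnt : 0 + t.count '(' < t.count ')' := by
    simp [List.count_cons] at h2; omega
  obtain ⟨inner, rest, he, hc, hp⟩ := firstCross t 0 hcnt
  subst he
  refine ⟨inner, rest, rfl, ⟨fun p => by simpa using hp p, by omega⟩, ⟨?_, ?_⟩⟩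
  · intro p
    have := h1 (inner.length + p + 2)
    have htake : ('(' :: (inner ++ ')' :: rest)).take (inner.length + p + 2) =
        '(' :: (inner ++ ')' :: rest.take p) := by
      rw [show inner.length + p + 2 = (inner.length + (p + 1)) + 1 by omega,
        List.take_succ_cons, List.take_append, List.take_of_length_le (by omega),
        show inner.length + (p + 1) - inner.length = p + 1 by omega, List.take_succ_cons]
    rw [htake] at this
    simp [List.count_append, List.count_cons] at this ⊢
    omega
  · simp [List.count_append, List.count_cons] at h2
    omega

lemma prefix_drop {α : Type} {l1 l2 v : List α} (h : l1 ++ l2 <+: v) :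
    l2 <+: v.drop l1.length := by
  obtain ⟨w, hw⟩ := h
  refine ⟨w, ?_⟩
  rw [← hw, List.append_assoc, List.drop_left]

lemma take_of_append_prefix {α : Type} {l1 l2 v : List α} (h : l1 ++ l2 <+: v) :
    v.take l1.length = l1 := by
  obtain ⟨w, hw⟩ := h
  rw [← hw, List.append_assoc, List.take_left]

-- single-step unfolding lemmas for dpALoop (its equations are split by stack shape)
lemma stepA_lparen (fuel : Nat) (regex : List Char) (i : Int) (rest : List (Int × Char))
    (nr cache : List Char) (stk : List Int) :
    dpALoop fuel regex ((i, '(') :: rest) (nr, cache, stk) =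
      dpALoop fuel regex rest (nr, cache, stk ++ [i]) := by
  match stk with
  | [] => rw [dpALoop.eq_2]; simp
  | [f] => rw [dpALoop.eq_3]; simp
  | f :: g :: gs => rw [dpALoop.eq_4 fuel regex i '(' rest nr cache (f :: g :: gs) (by simp) (by simp)]; simp

lemma stepA_rparen_single (fuel : Nat) (regex : List Char) (i : Int) (rest : List (Int × Char))
    (nr cache : List Char) (f : Int) (h : f - i < 1) :
    dpALoop fuel regex ((i, ')') :: rest) (nr, cache, [f]) =
      dpALoop fuel regex rest
        (nr ++ ('(' :: dpA fuel (PySem.List.slice regex (some (f + 1)) (some i)) ++ [')']),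
         '(' :: dpA fuel (PySem.List.slice regex (some (f + 1)) (some i)) ++ [')'], []) := by
  rw [dpALoop.eq_3]
  simp [h]

lemma stepA_rparen_deep (fuel : Nat) (regex : List Char) (i : Int) (rest : List (Int × Char))
    (nr cache : List Char) (f g : Int) (gs : List Int) :
    dpALoop fuel regex ((i, ')') :: rest) (nr, cache, f :: g :: gs) =
      dpALoop fuel regex rest (nr, cache, (f :: g :: gs).dropLast) := by
  rw [dpALoop.eq_4 fuel regex i ')' rest nr cache (f :: g :: gs) (by simp) (by simp)]
  simp

lemma stepA_skip (fuel : Nat) (regex : List Char) (i : Int) (c : Char) (rest : List (Int × Char))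
    (nr cache : List Char) (stk : List Int) (hc1 : c ≠ '(') (hc2 : c ≠ ')') (hne : stk ≠ []) :
    dpALoop fuel regex ((i, c) :: rest) (nr, cache, stk) =
      dpALoop fuel regex rest (nr, cache, stk) := by
  match stk with
  | [f] => rw [dpALoop.eq_3]; simp [hc1, hc2]
  | f :: g :: gs =>
    rw [dpALoop.eq_4 fuel regex i c rest nr cache (f :: g :: gs) (by simp) (by simp)]
    simp [hc1, hc2]

lemma stepA_top_plus (fuel : Nat) (regex : List Char) (i : Int) (rest : List (Int × Char))
    (nr cache : List Char) :
    dpALoop fuel regex ((i, '+') :: rest) (nr, cache, []) =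
      dpALoop fuel regex rest (nr ++ '.' :: cache ++ ['*'], cache, []) := by
  rw [dpALoop.eq_2]; simp

lemma stepA_top_other (fuel : Nat) (regex : List Char) (i : Int) (c : Char)
    (rest : List (Int × Char)) (nr cache : List Char)
    (hc1 : c ≠ '(') (hc2 : c ≠ ')') (hc3 : c ≠ '+') :
    dpALoop fuel regex ((i, c) :: rest) (nr, cache, []) =
      dpALoop fuel regex rest (nr ++ [c], [c], []) := by
  rw [dpALoop.eq_2]; simp [hc1, hc2, hc3]

-- dpALoop is a left fold: it distributes over ++
lemma dpALoop_append (fuel : Nat) (regex : List Char) :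
    ∀ (l1 l2 : List (Int × Char)) (st : List Char × List Char × List Int),
      dpALoop fuel regex (l1 ++ l2) st = dpALoop fuel regex l2 (dpALoop fuel regex l1 st) := by
  intro l1
  induction l1 with
  | nil =>
    intro l2 st
    have h0 : dpALoop fuel regex [] st = st := by rw [dpALoop.eq_1]
    rw [h0, List.nil_append]
  | cons p tl ih =>
    intro l2 st
    obtain ⟨i, c⟩ := p
    obtain ⟨nr, ca, stk⟩ := st
    rw [List.cons_append]
    match stk with
    | [] =>
      rw [dpALoop.eq_2, dpALoop.eq_2]
      split_ifs <;> exact ih _ _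
    | [f] =>
      rw [dpALoop.eq_3, dpALoop.eq_3]
      split_ifs <;> exact ih _ _
    | f :: g :: gs =>
      rw [dpALoop.eq_4 fuel regex i c (tl ++ l2) nr ca (f :: g :: gs) (by simp) (by simp),
        dpALoop.eq_4 fuel regex i c tl nr ca (f :: g :: gs) (by simp) (by simp)]
      split_ifs <;> exact ih _ _

-- while the stack is nonempty, A's loop only tracks parentheses over a balanced segment
lemma skipA : ∀ (N : Nat) (cs : List Char), cs.length ≤ N → bal cs →
    ∀ (fuel : Nat) (regex : List Char) (s : Int) (nr cache : List Char) (stk : List Int),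
      stk ≠ [] →
      dpALoop fuel regex (PySem.List.enumerate cs s) (nr, cache, stk) = (nr, cache, stk) := by
  intro N
  induction N with
  | zero =>
    intro cs hlen _ fuel regex s nr cache stk _
    have h : cs = [] := List.length_eq_zero_iff.mp (by omega)
    subst h
    rw [PySem.List.enumerate_nil, dpALoop.eq_1]
  | succ N ih =>
    intro cs hlen hbal fuel regex s nr cache stk hne
    cases cs with
    | nil => rw [PySem.List.enumerate_nil, dpALoop.eq_1]
    | cons c t =>
      by_cases hc1 : c = '('
      · subst hc1
        obtain ⟨inner, rest, he, hbi, hbr⟩ := balSplit hbal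
        subst he
        rw [PySem.List.enumerate_cons, PySem.List.enumerate_append, PySem.List.enumerate_cons,
          stepA_lparen, dpALoop_append]
        have hlen' : inner.length ≤ N := by simp [List.length_append] at hlen; omega
        rw [ih inner hlen' hbi fuel regex _ nr cache (stk ++ [s]) (by simp)]
        obtain ⟨f0, fs, rfl⟩ := List.exists_cons_of_ne_nil hne
        rw [show (f0 :: fs) ++ [s] = f0 :: (fs ++ [s]) from rfl]
        obtain ⟨g0, gs, hg⟩ := List.exists_cons_of_ne_nil (l := fs ++ [s]) (by simp)
        rw [hg, stepA_rparen_deep, ← hg]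
        have hdl : (f0 :: (fs ++ [s])).dropLast = f0 :: fs := by
          rw [show f0 :: (fs ++ [s]) = (f0 :: fs) ++ [s] from rfl, List.dropLast_concat]
        rw [hdl]
        exact ih rest (by simp [List.length_append] at hlen; omega) hbr fuel regex _ nr cache
          (f0 :: fs) (by simp)
      · by_cases hc2 : c = ')'
        · subst hc2; exact absurd hbal bal_not_rparen
        · rw [PySem.List.enumerate_cons, stepA_skip fuel regex s c _ nr cache stk hc1 hc2 hne]
          exact ih t (by simp at hlen; omega) (bal_cons_other hc1 hc2 hbal) fuel regex _ nr cache
            stk hne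

-- single-step lemmas for B's fold
lemma stepB_lparen (st : List (List Char × List Char)) :
    bStep st '(' = ([], []) :: st := by simp [bStep]

lemma stepB_rparen (inner ci acc ca : List Char) (fr : List (List Char × List Char)) :
    bStep ((inner, ci) :: (acc, ca) :: fr) ')' =
      (acc ++ ('(' :: inner ++ [')']), '(' :: inner ++ [')']) :: fr := by simp [bStep]

lemma stepB_plus (acc cache : List Char) (fr : List (List Char × List Char)) :
    bStep ((acc, cache) :: fr) '+' = (acc ++ '.' :: cache ++ ['*'], cache) :: fr := by
  simp [bStep]

lemma stepB_other (c : Char) (acc cache : List Char) (fr : List (List Char × List Char))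
    (hc1 : c ≠ '(') (hc2 : c ≠ ')') (hc3 : c ≠ '+') :
    bStep ((acc, cache) :: fr) c = (acc ++ [c], [c]) :: fr := by
  simp [bStep, hc1, hc2, hc3]

-- main lemma: on a balanced segment, A's top-level loop and B's fold compute the same
-- output-extension X and final cache Y (both as functions of the incoming cache)
lemma mainM : ∀ (N : Nat) (cs : List Char), cs.length ≤ N → bal cs →
    ∃ X Y : List Char → List Char,
      (∀ (fuel : Nat) (regex : List Char) (n : Nat), cs.length ≤ fuel →
          cs <+: regex.drop n → ∀ nr cache,
          dpALoop fuel regex (PySem.List.enumerate cs (n : Int)) (nr, cache, []) =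
            (nr ++ X cache, Y cache, [])) ∧
      (∀ acc cache fr, List.foldl bStep ((acc, cache) :: fr) cs = (acc ++ X cache, Y cache) :: fr) := by
  intro N
  induction N with
  | zero =>
    intro cs hlen _
    have h : cs = [] := List.length_eq_zero_iff.mp (by omega)
    subst h
    exact ⟨fun _ => [], fun ca => ca, fun _ _ _ _ _ _ _ => by
      rw [PySem.List.enumerate_nil, dpALoop.eq_1]; simp, fun _ _ _ => by simp⟩
  | succ N ih =>
    intro cs hlen hbal
    cases cs with
    | nil =>
      exact ⟨fun _ => [], fun ca => ca, fun _ _ _ _ _ _ _ => by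
        rw [PySem.List.enumerate_nil, dpALoop.eq_1]; simp, fun _ _ _ => by simp⟩
    | cons c t =>
      by_cases hc1 : c = '('
      · subst hc1
        obtain ⟨inner, rest, he, hbi, hbr⟩ := balSplit hbal
        subst he
        obtain ⟨Xi, Yi, hAi, hBi⟩ := ih inner (by simp at hlen; omega) hbi
        obtain ⟨Xr, Yr, hAr, hBr⟩ := ih rest (by simp at hlen; omega) hbr
        refine ⟨fun _ => ('(' :: Xi [] ++ [')']) ++ Xr ('(' :: Xi [] ++ [')']),
          fun _ => Yr ('(' :: Xi [] ++ [')']), ?_, ?_⟩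
        · intro fuel regex n hfuel hpre nr cache
          have hlen2 : 2 + inner.length + rest.length ≤ fuel := by
            simp [List.length_append] at hfuel; omega
          obtain ⟨f', rfl⟩ : ∃ f', fuel = f' + 1 := ⟨fuel - 1, by omega⟩
          rw [PySem.List.enumerate_cons, PySem.List.enumerate_append, PySem.List.enumerate_cons,
            stepA_lparen, List.cons_append, dpALoop_append]
          rw [show ([] : List Int) ++ [(n : Int)] = [(n : Int)] from rfl]
          rw [skipA inner.length inner le_rfl hbi (f' + 1) regex _ nr cache [(n : Int)] (by simp)]
          rw [stepA_rparen_single (f' + 1) regex _ _ nr cache (n : Int) (by push_cast; omega)]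
          -- identify the slice with `inner`
          have hpre' : inner ++ ')' :: rest <+: regex.drop (n + 1) := by
            have h2 := prefix_drop (l1 := ['(']) (l2 := inner ++ ')' :: rest) (by simpa using hpre)
            rw [List.drop_drop] at h2
            simpa [Nat.add_comm] using h2
          have hslice : PySem.List.slice regex (some ((n : Int) + 1))
              (some ((n : Int) + 1 + (inner.length : Int))) = inner := by
            rw [show ((n : Int) + 1) = ((n + 1 : Nat) : Int) by push_cast; ring,
              show (((n + 1 : Nat) : Int) + (inner.length : Int)) = ((n + 1 + inner.length : Nat) : Int) by push_cast; ring,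
              PySem.List.slice_natCast,
              show n + 1 + inner.length - (n + 1) = inner.length by omega]
            exact take_of_append_prefix (l2 := ')' :: rest) hpre'
          rw [hslice]
          -- evaluate the recursive call on `inner` by the inner IH
          have hdpa : dpA (f' + 1) inner = Xi [] := by
            rw [dpA.eq_2]
            rw [show (0 : Int) = ((0 : Nat) : Int) from rfl,
              hAi f' inner 0 (by omega) (by simp) [] []]
            simp
          rw [hdpa]
          -- process the remainder
          have hprer : rest <+: regex.drop (n + 1 + inner.length + 1) := by
            have h2 : (inner ++ [')']) ++ rest <+: regex.drop (n + 1) := by simpa using hpre'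
            have h3 := prefix_drop h2
            rw [List.drop_drop] at h3
            have h4 : n + 1 + (inner ++ [')']).length = n + 1 + inner.length + 1 := by
              simp only [List.length_append, List.length_cons, List.length_nil]
              omega
            rw [h4] at h3
            exact h3
          rw [show (n : Int) + 1 + (inner.length : Int) + 1 = ((n + 1 + inner.length + 1 : Nat) : Int) by push_cast; ring]
          rw [hAr (f' + 1) regex (n + 1 + inner.length + 1) (by omega) hprer]
          simp
        · intro acc cache fr
          rw [List.foldl_cons, stepB_lparen, List.foldl_append,
            hBi [] [] ((acc, cache) :: fr), List.foldl_cons, stepB_rparen, hBr]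
          simp
      · by_cases hc2 : c = ')'
        · subst hc2; exact absurd hbal bal_not_rparen
        · have hbt := bal_cons_other hc1 hc2 hbal
          obtain ⟨Xt, Yt, hAt, hBt⟩ := ih t (by simp at hlen; omega) hbt
          have hpret : ∀ (regex : List Char) (n : Nat), c :: t <+: regex.drop n →
              t <+: regex.drop (n + 1) := by
            intro regex n hpre
            have h2 := prefix_drop (l1 := [c]) (l2 := t) (by simpa using hpre)
            rw [List.drop_drop] at h2
            simpa [Nat.add_comm] using h2
          by_cases hc3 : c = '+'
          · subst hc3
            refine ⟨fun cache => ('.' :: cache ++ ['*']) ++ Xt cache, fun cache => Yt cache, ?_, ?_⟩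
            · intro fuel regex n hfuel hpre nr cache
              rw [PySem.List.enumerate_cons, stepA_top_plus,
                show (n : Int) + 1 = ((n + 1 : Nat) : Int) by push_cast; ring,
                hAt fuel regex (n + 1) (by simp at hfuel; omega) (hpret regex n hpre)]
              simp
            · intro acc cache fr
              rw [List.foldl_cons, stepB_plus, hBt]
              simp
          · refine ⟨fun _ => c :: Xt [c], fun _ => Yt [c], ?_, ?_⟩
            · intro fuel regex n hfuel hpre nr cache
              rw [PySem.List.enumerate_cons, stepA_top_other fuel regex _ c _ nr cache hc1 hc2 hc3,
                show (n : Int) + 1 = ((n + 1 : Nat) : Int) by push_cast; ring,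
                hAt fuel regex (n + 1) (by simp at hfuel; omega) (hpret regex n hpre)]
              simp
            · intro acc cache fr
              rw [List.foldl_cons, stepB_other c acc cache fr hc1 hc2 hc3, hBt]
              simp

-- ===== VERDICT (by name: the statement is the Claim_ definition above) =====
theorem decompose_plus_spec : Claim_equal_decompose_plus := by
  intro regex _ hpre
  unfold Spec_decompose_plus
  have hbal := pre_imp_bal regex hpre
  obtain ⟨X, Y, hA, hB⟩ := mainM regex.toList.length regex.toList le_rfl hbal
  unfold decompose_plus decompose_plus_alt
  have hA' := hA regex.toList.length regex.toList 0 le_rfl (by simp) [] []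
  have hB' := hB [] [] []
  rw [dpA.eq_2]
  rw [show ((0 : Nat) : Int) = (0 : Int) by simp] at hA'
  rw [hA', hB']
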